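-- pv_equiv track=rewrite | github.com/CuccBoii/MyPlayground | ex3.py | convert_board
-- ===== SOURCE A (Python) =====
-- def convert_board(game):
--     boards = [0b000000000,0b000000000]
--     for row in game:
--         for cell in row:
--             boards[0] = boards[0] << 1
--             boards[1] = boards[1] << 1
--             if cell == 1:
--                 boards[0] = boards[0] | 1 # turn on right bit
--             elif cell == 2:
--                 boards[1] = boards[1] | 1 # turn on right bit
--     return boards
-- ===== SOURCE B (Python) =====
-- def convert_board(game):
--     # Flatten the board, then place each player's bits positionally:
--     # cell j from the end of the flattened board contributes 1 << j.
--     flat = [cell for row in game for cell in row]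
--     rev = flat[::-1]
--     return [sum(1 << j for j, c in enumerate(rev) if c == v) for v in (1, 2)]
-- ===== Notes on version B (the rewrite author's own statement) =====
-- stated objective: alternative
-- what changed: Instead of shifting two accumulators left on every cell of a nested loop, B flattens the board once and builds each player's mask by positional placement: a sum of 1<<j over the reversed flat board where the cell equals that player.
import Mathlib
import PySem

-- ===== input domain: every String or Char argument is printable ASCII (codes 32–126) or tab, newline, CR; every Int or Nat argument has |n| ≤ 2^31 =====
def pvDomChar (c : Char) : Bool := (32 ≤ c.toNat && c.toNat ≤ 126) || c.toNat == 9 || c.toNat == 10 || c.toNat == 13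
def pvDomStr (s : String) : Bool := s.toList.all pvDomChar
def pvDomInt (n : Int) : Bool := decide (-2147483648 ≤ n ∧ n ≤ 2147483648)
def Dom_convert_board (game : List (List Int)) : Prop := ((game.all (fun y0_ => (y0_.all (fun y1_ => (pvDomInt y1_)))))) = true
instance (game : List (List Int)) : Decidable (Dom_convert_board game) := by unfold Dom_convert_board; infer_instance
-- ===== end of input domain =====

-- B flattens the board once and builds each player's mask by positional bit placement
-- (sum of 1<<j over the reversed flat board) instead of shifting two accumulators per cell;
-- alternative decomposition, same O(n) cost.

-- ===== PORT A =====
def pvCellStep (b : Int × Int) (cell : Int) : Int × Int :=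
  let b0 := b.1 <<< (1:Nat)
  let b1 := b.2 <<< (1:Nat)
  if cell = 1 then (PySem.Int.bor b0 1, b1)
  else if cell = 2 then (b0, PySem.Int.bor b1 1)
  else (b0, b1)

def convert_board (game : List (List Int)) : List Int :=
  let boards := game.foldl (fun b row => row.foldl pvCellStep b) ((0:Int), (0:Int))
  [boards.1, boards.2]

-- ===== PORT B =====
def pvPow2 (k : Nat) : Int := (1:Int) <<< k

-- enumerate starts at 0, so the index is nonnegative and .toNat is exact here
def pvPlayerMask (flat : List Int) (v : Int) : Int :=
  ((PySem.List.enumerate flat.reverse 0).map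
    (fun p => if p.2 = v then pvPow2 p.1.toNat else 0)).sum

def convert_board_alt (game : List (List Int)) : List Int :=
  let flat := game.flatMap (fun row => row)
  [pvPlayerMask flat 1, pvPlayerMask flat 2]

-- ===== PRECONDITION & SPEC =====
def Spec_convert_board (game : List (List Int)) (out : List Int) : Prop := out = convert_board_alt game
instance (game : List (List Int)) (out : List Int) : Decidable (Spec_convert_board game out) := by unfold Spec_convert_board; infer_instance

-- ===== CLAIM (what is proved, stated in full; the proofs are below) =====
def Claim_equal_convert_board : Prop := ∀ (game : List (List Int)), Dom_convert_board game → Spec_convert_board game (convert_board game)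

-- ===== LEMMAS AND PROOFS =====

theorem pv_lor_two_mul_nat (m : Nat) : 2*m ||| 1 = 2*m + 1 := by
  have h := Nat.lor_bit false m true 0
  simp [Nat.bit] at h
  simpa [Nat.mul_comm] using h

theorem pv_bor_two_mul (b : Int) (h : 0 ≤ b) : PySem.Int.bor (2*b) 1 = 2*b + 1 := by
  rw [PySem.Int.bor_of_nonneg (by omega) (by omega)]
  have h1 : (2*b).toNat = 2 * b.toNat := by omega
  have h2 : (1:Int).toNat = 1 := rfl
  rw [h1, h2, pv_lor_two_mul_nat]
  omega

theorem pv_shl_one (a : Int) : a <<< (1:Nat) = 2 * a := by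
  simp [Int.shiftLeft_eq]; ring

theorem pv_msum_shift (v : Int) (ys : List Int) : ∀ (s : Int), 0 ≤ s →
    ((PySem.List.enumerate ys (s+1)).map
      (fun p => if p.2 = v then pvPow2 p.1.toNat else 0)).sum
    = 2 * ((PySem.List.enumerate ys s).map
      (fun p => if p.2 = v then pvPow2 p.1.toNat else 0)).sum := by
  induction ys with
  | nil => intro s _; simp [PySem.List.enumerate_nil]
  | cons x xs ih =>
    intro s hs
    rw [PySem.List.enumerate_cons, PySem.List.enumerate_cons]
    simp only [List.map_cons, List.sum_cons]
    rw [ih (s+1) (by omega)]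
    have hf : (if x = v then pvPow2 (s+1).toNat else 0)
        = 2 * (if x = v then pvPow2 s.toNat else 0) := by
      have hk : (s+1).toNat = s.toNat + 1 := by omega
      by_cases hx : x = v
      · rw [if_pos hx, if_pos hx, hk]
        simp only [pvPow2, Int.shiftLeft_eq, pow_succ]; ring
      · rw [if_neg hx, if_neg hx]; ring
    rw [hf]; ring

theorem pv_mask_append (xs : List Int) (c v : Int) :
    pvPlayerMask (xs ++ [c]) v = 2 * pvPlayerMask xs v + (if c = v then 1 else 0) := by
  unfold pvPlayerMask
  rw [List.reverse_append]
  simp only [List.reverse_singleton, List.singleton_append]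
  rw [PySem.List.enumerate_cons]
  simp only [List.map_cons, List.sum_cons]
  rw [pv_msum_shift v xs.reverse 0 (by omega)]
  have h0 : ((0:Int).toNat) = 0 := rfl
  by_cases hc : c = v
  · rw [if_pos hc, if_pos hc, h0]
    have : pvPow2 0 = 1 := rfl
    rw [this]; ring
  · rw [if_neg hc, if_neg hc]; ring

theorem pv_mask_nonneg (xs : List Int) (v : Int) : 0 ≤ pvPlayerMask xs v := by
  unfold pvPlayerMask
  apply List.sum_nonneg
  intro x hx
  simp only [List.mem_map] at hx
  obtain ⟨p, _, rfl⟩ := hx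
  by_cases h : p.2 = v
  · rw [if_pos h]
    simp only [pvPow2, Int.shiftLeft_eq]; positivity
  · rw [if_neg h]

theorem pv_fold_eq_masks (xs : List Int) :
    xs.foldl pvCellStep ((0:Int), (0:Int)) = (pvPlayerMask xs 1, pvPlayerMask xs 2) := by
  induction xs using List.reverseRecOn with
  | nil => simp [pvPlayerMask, PySem.List.enumerate_nil]
  | append_singleton xs c ih =>
    rw [List.foldl_append, ih]
    simp only [List.foldl_cons, List.foldl_nil]
    rw [pv_mask_append, pv_mask_append]
    have h1 := pv_mask_nonneg xs 1
    have h2 := pv_mask_nonneg xs 2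
    unfold pvCellStep
    simp only [pv_shl_one]
    by_cases hc1 : c = 1
    · simp [hc1, pv_bor_two_mul _ h1]
    · by_cases hc2 : c = 2
      · simp [hc2, pv_bor_two_mul _ h2]
      · simp [hc1, hc2]

theorem pv_fold_flatten (game : List (List Int)) : ∀ (b : Int × Int),
    game.foldl (fun b row => row.foldl pvCellStep b) b
    = (game.flatMap (fun r => r)).foldl pvCellStep b := by
  induction game with
  | nil => intro b; simp
  | cons r rs ih => intro b; simp [List.flatMap_cons, List.foldl_append, ih]

-- ===== VERDICT (by name: the statement is the Claim_ definition above) =====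
theorem convert_board_spec : Claim_equal_convert_board := by
  intro game _
  unfold Spec_convert_board convert_board convert_board_alt
  rw [pv_fold_flatten game ((0:Int), (0:Int)), pv_fold_eq_masks]
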